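-- pv_equiv track=rewrite | github.com/RickPaddock/Advent-of-Code | 2024/Day 14/Day14.py | move_robot
-- ===== SOURCE A (Python) =====
-- def move_robot(tall, wide, start_xy, vel_xy, iterations):
--     move_to_x = start_xy[0]
--     move_to_y = start_xy[1]
--     for _ in range(iterations):
--         move_to_x = int(move_to_x) + int(vel_xy[0])
--         move_to_y = int(move_to_y) + int(vel_xy[1])
--         # Loop to other side of lobby upon exit
--         if move_to_x >= wide:
--             move_to_x = move_to_x - wide
--         elif move_to_x < 0:
--             move_to_x = wide + move_to_x
--         if move_to_y >= tall:
--             move_to_y = move_to_y - tall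
--         elif move_to_y < 0:
--             move_to_y = tall + move_to_y
--     final_xy = (move_to_x, move_to_y)
--     return final_xy
-- ===== SOURCE B (Python) =====
-- def move_robot(tall, wide, start_xy, vel_xy, iterations):
--     # Per axis: walk until the orbit returns to its starting position (a period),
--     # then collapse the remaining iterations modulo that period and finish the
--     # few leftover steps.
--     def wrap(p, dim):
--         if p >= dim:
--             return p - dim
--         if p < 0:
--             return p + dim
--         return p
--     def solve(pos, vel, dim):
--         start = pos
--         step = 0
--         while step < iterations:
--             pos = wrap(pos + vel, dim)
--             step += 1
--             if pos == start:
--                 break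
--         else:
--             return pos
--         # a period of length `step` was found: collapse the rest modulo it
--         remaining = (iterations - step) % step
--         for _ in range(remaining):
--             pos = wrap(pos + vel, dim)
--         return pos
--     return (solve(start_xy[0], vel_xy[0], wide),
--             solve(start_xy[1], vel_xy[1], tall))
-- ===== Notes on version B (the rewrite author's own statement) =====
-- stated objective: alternative
-- what changed: A step-simulates every iteration; B per axis walks only until the orbit returns to its starting position, collapses the remaining iterations modulo that detected period, and finishes the few leftover steps, so it avoids full simulation whenever the orbit is periodic from its start.
-- outside the precondition, e.g. on move_robot(5, 5, (1, 1), (), 0): A returns (1, 1), B raises IndexError; on move_robot(5, 5, (1, 1), (2,), -3): A returns (1, 1), B raises IndexError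
import Mathlib
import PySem

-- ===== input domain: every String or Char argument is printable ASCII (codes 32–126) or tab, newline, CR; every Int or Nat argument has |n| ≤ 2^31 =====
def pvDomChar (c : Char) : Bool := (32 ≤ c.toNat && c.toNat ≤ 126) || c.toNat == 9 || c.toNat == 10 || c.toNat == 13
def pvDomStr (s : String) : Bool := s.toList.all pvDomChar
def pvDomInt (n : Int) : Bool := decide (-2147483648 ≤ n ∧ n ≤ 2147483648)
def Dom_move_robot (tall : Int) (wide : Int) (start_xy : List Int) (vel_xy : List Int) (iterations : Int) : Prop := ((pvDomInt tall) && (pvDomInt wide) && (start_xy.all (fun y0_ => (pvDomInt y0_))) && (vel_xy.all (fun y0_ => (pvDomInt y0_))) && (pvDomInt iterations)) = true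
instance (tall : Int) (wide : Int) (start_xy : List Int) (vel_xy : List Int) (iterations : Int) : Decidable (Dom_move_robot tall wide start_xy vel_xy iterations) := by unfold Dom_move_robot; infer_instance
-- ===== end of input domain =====

-- B replaces A's full step-by-step simulation by per-axis period detection: it walks
-- until the orbit returns to its starting position, collapses the remaining iterations
-- modulo that period, and finishes the leftover steps (objective: alternative).

-- ===== PORT A =====
def move_robot (tall : Int) (wide : Int) (start_xy : List Int) (vel_xy : List Int) (iterations : Int) : List Int :=
  let move_to_x := PySem.List.pyGetD start_xy 0 0
  let move_to_y := PySem.List.pyGetD start_xy 1 0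
  let p := (PySem.List.pyRange 0 iterations 1).foldl
    (fun (xy : Int × Int) _ =>
      let x := xy.1 + PySem.List.pyGetD vel_xy 0 0
      let y := xy.2 + PySem.List.pyGetD vel_xy 1 0
      let x := if x ≥ wide then x - wide else if x < 0 then wide + x else x
      let y := if y ≥ tall then y - tall else if y < 0 then tall + y else y
      (x, y))
    (move_to_x, move_to_y)
  [p.1, p.2]

-- ===== PORT B =====
-- Source B's wrap helper.
def wrapB (dim p : Int) : Int :=
  if p ≥ dim then p - dim else if p < 0 then p + dim else p

-- Source B's final 'for _ in range(remaining)' loop.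
def solveTail (vel dim : Int) : Nat → Int → Int
  | 0, pos => pos
  | fuel + 1, pos => solveTail vel dim fuel (wrapB dim (pos + vel))

-- Source B's while loop; fuel = remaining loop entries (iterations - step).toNat; when it
-- runs out the while's else-branch returns pos.
def solveGo (iterations vel dim start : Int) : Nat → Int → Int → Int
  | 0, _, pos => pos
  | fuel + 1, step, pos =>
    let pos' := wrapB dim (pos + vel)
    let step' := step + 1
    if pos' = start then
      solveTail vel dim (PySem.Int.mod (iterations - step') step').toNat pos'
    else
      solveGo iterations vel dim start fuel step' pos'

def solve (iterations pos vel dim : Int) : Int :=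
  solveGo iterations vel dim pos iterations.toNat 0 pos

def move_robot_alt (tall : Int) (wide : Int) (start_xy : List Int) (vel_xy : List Int) (iterations : Int) : List Int :=
  [solve iterations (PySem.List.pyGetD start_xy 0 0) (PySem.List.pyGetD vel_xy 0 0) wide,
   solve iterations (PySem.List.pyGetD start_xy 1 0) (PySem.List.pyGetD vel_xy 1 0) tall]

-- ===== PRECONDITION & SPEC =====
-- Pre_ excludes only coordinate lists shorter than 2: on those A raises IndexError for
-- short start_xy or for short vel_xy with iterations > 0, and when iterations ≤ 0 with a
-- short vel_xy (which A never reads) B's unconditional vel_xy[0] lookup raises instead.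
def Pre_move_robot (tall : Int) (wide : Int) (start_xy : List Int) (vel_xy : List Int) (iterations : Int) : Prop :=
  2 ≤ start_xy.length ∧ 2 ≤ vel_xy.length
instance (tall : Int) (wide : Int) (start_xy : List Int) (vel_xy : List Int) (iterations : Int) : Decidable (Pre_move_robot tall wide start_xy vel_xy iterations) := by unfold Pre_move_robot; infer_instance

def pvWitness_move_robot : Int × Int × List Int × List Int × Int := (7, 11, [3, 2], [4, -3], 5)

def Spec_move_robot (tall : Int) (wide : Int) (start_xy : List Int) (vel_xy : List Int) (iterations : Int) (out : List Int) : Prop := out = move_robot_alt tall wide start_xy vel_xy iterations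
instance (tall : Int) (wide : Int) (start_xy : List Int) (vel_xy : List Int) (iterations : Int) (out : List Int) : Decidable (Spec_move_robot tall wide start_xy vel_xy iterations out) := by unfold Spec_move_robot; infer_instance

-- ===== CLAIM =====
def Claim_equal_move_robot : Prop := ∀ (tall : Int) (wide : Int) (start_xy : List Int) (vel_xy : List Int) (iterations : Int), Dom_move_robot tall wide start_xy vel_xy iterations → Pre_move_robot tall wide start_xy vel_xy iterations → Spec_move_robot tall wide start_xy vel_xy iterations (move_robot tall wide start_xy vel_xy iterations)

-- ===== LEMMAS AND PROOFS =====

-- The one-step wrap both programs apply, as a named function of the proof layer.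
def wstep (vel dim x : Int) : Int :=
  let t := x + vel
  if t ≥ dim then t - dim else if t < 0 then t + dim else t

-- A fold that ignores the list elements is function iteration.
theorem foldl_const_iterate {α β : Type} (g : α → α) (l : List β) (a : α) :
    l.foldl (fun x _ => g x) a = g^[l.length] a := by
  induction l generalizing a with
  | nil => rfl
  | cons h t ih => simp [List.foldl, ih, Function.iterate_succ_apply]

-- Once the orbit repeats (x_{j+L} = x_j), every later index reduces modulo L.
theorem iterate_cycle {α : Type} (g : α → α) (x : α) (j L : Nat) (hL : 0 < L)
    (h : g^[j + L] x = g^[j] x) : ∀ m, g^[j + m] x = g^[j + m % L] x := by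
  intro m
  induction m using Nat.strong_induction_on with
  | _ m ih =>
    by_cases hm : m < L
    · rw [Nat.mod_eq_of_lt hm]
    · have h1 : g^[j + m] x = g^[j + (m - L)] x := by
        have : j + m = (m - L) + (j + L) := by omega
        rw [this, Function.iterate_add_apply, h, ← Function.iterate_add_apply]
        congr 1; omega
      rw [h1, ih (m - L) (by omega), Nat.mod_eq_sub_mod (Nat.le_of_not_lt hm)]

-- wrapB applied after adding vel is the one-step map wstep.
theorem wrapB_wstep (vel dim pos : Int) : wrapB dim (pos + vel) = wstep vel dim pos := rfl

-- The tail loop is function iteration.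
theorem solveTail_eq (vel dim : Int) (r : Nat) (pos : Int) :
    solveTail vel dim r pos = (wstep vel dim)^[r] pos := by
  induction r generalizing pos with
  | zero => rfl
  | succ r ih => rw [solveTail, wrapB_wstep, ih, ← Function.iterate_succ_apply]

-- Invariant of Source B's while loop: pos is the k-th orbit point; on return to the start a
-- period of length step is found and the remaining iterations collapse modulo it.
theorem solveGo_eq (vel dim x0 : Int) (n : Nat) :
    ∀ (fuel k : Nat), fuel = n - k → k ≤ n →
    solveGo (n : Int) vel dim x0 fuel (k : Int) ((wstep vel dim)^[k] x0)
      = (wstep vel dim)^[n] x0 := by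
  intro fuel
  induction fuel with
  | zero =>
    intro k hfuel hk
    have : k = n := by omega
    simp [solveGo, this]
  | succ fuel ih =>
    intro k hfuel hk
    have hklt : k < n := by omega
    rw [solveGo]
    rw [wrapB_wstep, ← Function.iterate_succ_apply' (wstep vel dim) k x0]
    by_cases hper : (wstep vel dim)^[k + 1] x0 = x0
    · rw [if_pos hper]
      set L : Nat := k + 1 with hL
      have hmod : PySem.Int.mod ((n : Int) - ((k : Int) + 1)) ((k : Int) + 1)
          = (((n - L) % L : Nat) : Int) := by
        have h1 : (n : Int) - ((k : Int) + 1) = ((n - L : Nat) : Int) := by omega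
        have h2 : (k : Int) + 1 = ((L : Nat) : Int) := by omega
        rw [h1, h2, PySem.Int.mod_natCast]
      rw [hmod, Int.toNat_natCast, solveTail_eq, hper]
      have hcyc := iterate_cycle (wstep vel dim) x0 0 L (by omega)
        (by simpa using hper) n
      simp only [Nat.zero_add] at hcyc
      rw [← Nat.mod_eq_sub_mod (by omega), ← hcyc]
    · rw [if_neg hper]
      have hk1 : (k : Int) + 1 = ((k + 1 : Nat) : Int) := by push_cast; ring
      rw [hk1]
      exact ih (k + 1) (by omega) (by omega)

-- Source B's solve computes the iterate.
theorem solve_eq (iterations pos vel dim : Int) :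
    solve iterations pos vel dim = (wstep vel dim)^[iterations.toNat] pos := by
  unfold solve
  by_cases hpos : 0 < iterations
  · have hn : iterations = ((iterations.toNat : Nat) : Int) := by omega
    calc solveGo iterations vel dim pos iterations.toNat 0 pos
        = solveGo ((iterations.toNat : Nat) : Int) vel dim pos iterations.toNat
            ((0 : Nat) : Int) ((wstep vel dim)^[0] pos) := by rw [← hn]; rfl
      _ = (wstep vel dim)^[iterations.toNat] pos :=
          solveGo_eq vel dim pos iterations.toNat iterations.toNat 0 (by omega) (by omega)
  · have : iterations.toNat = 0 := by omega
    rw [this]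
    rfl

-- ===== VERDICT =====
theorem move_robot_spec : Claim_equal_move_robot := by
  intro tall wide start_xy vel_xy iterations _hDom _hPre
  unfold Spec_move_robot move_robot move_robot_alt
  dsimp only
  rw [PySem.List.foldl_prod_mk
        (f := fun (x : Int) (_ : Int) =>
          if x + PySem.List.pyGetD vel_xy 0 0 ≥ wide then x + PySem.List.pyGetD vel_xy 0 0 - wide
          else if x + PySem.List.pyGetD vel_xy 0 0 < 0 then wide + (x + PySem.List.pyGetD vel_xy 0 0)
          else x + PySem.List.pyGetD vel_xy 0 0)
        (g := fun (y : Int) (_ : Int) =>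
          if y + PySem.List.pyGetD vel_xy 1 0 ≥ tall then y + PySem.List.pyGetD vel_xy 1 0 - tall
          else if y + PySem.List.pyGetD vel_xy 1 0 < 0 then tall + (y + PySem.List.pyGetD vel_xy 1 0)
          else y + PySem.List.pyGetD vel_xy 1 0)]
  simp only [List.cons.injEq, and_true]
  constructor
  · rw [solve_eq]
    have hcongr : ∀ (l : List Int) (a : Int),
        l.foldl (fun x (_ : Int) =>
          if x + PySem.List.pyGetD vel_xy 0 0 ≥ wide then x + PySem.List.pyGetD vel_xy 0 0 - wide
          else if x + PySem.List.pyGetD vel_xy 0 0 < 0 then wide + (x + PySem.List.pyGetD vel_xy 0 0)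
          else x + PySem.List.pyGetD vel_xy 0 0) a
        = l.foldl (fun x _ => wstep (PySem.List.pyGetD vel_xy 0 0) wide x) a := by
      intro l a
      apply PySem.List.foldl_congr_mem
      intro acc x _
      simp only [wstep]
      split_ifs <;> ring
    rw [hcongr, foldl_const_iterate, PySem.List.length_pyRange_one]
    norm_num
  · rw [solve_eq]
    have hcongr : ∀ (l : List Int) (a : Int),
        l.foldl (fun y (_ : Int) =>
          if y + PySem.List.pyGetD vel_xy 1 0 ≥ tall then y + PySem.List.pyGetD vel_xy 1 0 - tall
          else if y + PySem.List.pyGetD vel_xy 1 0 < 0 then tall + (y + PySem.List.pyGetD vel_xy 1 0)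
          else y + PySem.List.pyGetD vel_xy 1 0) a
        = l.foldl (fun y _ => wstep (PySem.List.pyGetD vel_xy 1 0) tall y) a := by
      intro l a
      apply PySem.List.foldl_congr_mem
      intro acc x _
      simp only [wstep]
      split_ifs <;> ring
    rw [hcongr, foldl_const_iterate, PySem.List.length_pyRange_one]
    norm_num
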